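-- pv_equiv track=rewrite | github.com/daniel880423/Member_System | file/hw1/1100405/s1100405_4.py | homework_1
-- ===== SOURCE A (Python) =====
-- def homework_1(nums): # 請同學記得把檔案名稱改成自己的學號(ex.1104813.py)
--     out_lst = []
--     a = nums[0]
--     out = 0
--
--     for i in nums:
--         if i != a:
--             a = i
--             out_lst += [out]
--             out = 1
--         else:
--             out += 1
--     out_lst += [out]
--     out_lst.sort()
--
--     return out_lst[-1]
-- ===== SOURCE B (Python) =====
-- def homework_1(nums):
--     best = 0
--     cur = 0
--     prev = None
--     for x in nums:
--         cur = cur + 1 if prev is not None and x == prev else 1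
--         prev = x
--         if cur > best:
--             best = cur
--     return best
-- ===== Notes on version B (the rewrite author's own statement) =====
-- stated objective: faster
-- what changed: B tracks the current and maximum run length in a single pass instead of collecting all run lengths, sorting them and taking the last element.
import Mathlib
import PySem

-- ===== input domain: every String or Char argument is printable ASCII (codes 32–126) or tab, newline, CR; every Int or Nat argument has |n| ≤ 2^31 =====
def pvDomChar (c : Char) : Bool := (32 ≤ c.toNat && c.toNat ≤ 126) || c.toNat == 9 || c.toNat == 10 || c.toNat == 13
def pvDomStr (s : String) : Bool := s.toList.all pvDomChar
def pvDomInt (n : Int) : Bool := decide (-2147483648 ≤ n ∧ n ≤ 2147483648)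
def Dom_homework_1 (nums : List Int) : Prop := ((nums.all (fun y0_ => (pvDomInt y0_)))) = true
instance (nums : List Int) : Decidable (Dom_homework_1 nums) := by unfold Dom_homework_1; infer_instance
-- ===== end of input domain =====

-- B replaces A's collect-all-run-lengths-then-sort with a single pass tracking the
-- current and maximum run length (objective: faster, O(n) instead of O(n log n)).

-- ===== PORT A =====
-- A's loop body: state (out_lst, a, out)
def hw1_stepA (s : List Int × Int × Int) (i : Int) : List Int × Int × Int :=
  if i ≠ s.2.1 then (s.1 ++ [s.2.2], i, 1) else (s.1, s.2.1, s.2.2 + 1)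

def homework_1 (nums : List Int) : Int :=
  -- a = nums[0] raises IndexError on []; excluded by Pre_ (getD 0 is never reached inside Pre_)
  let a0 : Int := (PySem.List.pyGet? nums 0).getD 0
  let st := nums.foldl hw1_stepA ([], a0, 0)
  let out_lst := PySem.List.sorted (st.1 ++ [st.2.2]) id false
  (PySem.List.pyGet? out_lst (-1)).getD 0

-- ===== PORT B =====
-- B's loop body: state (best, cur, prev)
def hw1_stepB (s : Int × Int × Option Int) (x : Int) : Int × Int × Option Int :=
  let cur' : Int := if s.2.2 = some x then s.2.1 + 1 else 1
  (if cur' > s.1 then cur' else s.1, cur', some x)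

def homework_1_alt (nums : List Int) : Int :=
  (nums.foldl hw1_stepB (0, 0, none)).1

-- ===== PRECONDITION & SPEC =====
-- A raises IndexError on the empty list (nums[0]); Pre_ excludes exactly that input.
def Pre_homework_1 (nums : List Int) : Prop := nums ≠ []
instance (nums : List Int) : Decidable (Pre_homework_1 nums) := by unfold Pre_homework_1; infer_instance
def pvWitness_homework_1 : List Int := ([1, 1, 2])

def Spec_homework_1 (nums : List Int) (out : Int) : Prop := out = homework_1_alt nums
instance (nums : List Int) (out : Int) : Decidable (Spec_homework_1 nums out) := by unfold Spec_homework_1; infer_instance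

-- ===== CLAIM (what is proved, stated in full; the proofs are below) =====
def Claim_equal_homework_1 : Prop := ∀ (nums : List Int), Dom_homework_1 nums → Pre_homework_1 nums → Spec_homework_1 nums (homework_1 nums)

-- ===== LEMMAS AND PROOFS =====

lemma hw1_foldl_max_max : ∀ (l : List Int) (a b : Int), l.foldl max (max a b) = max (l.foldl max a) b := by
  intro l
  induction l with
  | nil => intro a b; rfl
  | cons c t ih =>
    intro a b
    simp only [List.foldl_cons]
    rw [max_right_comm a b c, ih]

lemma hw1_le_getLast_of_pairwise : ∀ (s : List Int) (h : s ≠ []), s.Pairwise (· ≤ ·) → ∀ y ∈ s, y ≤ s.getLast h := by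
  intro s
  induction s with
  | nil => intro h; exact absurd rfl h
  | cons a t ih =>
    intro _ hp y hy
    rcases List.pairwise_cons.mp hp with ⟨ha, ht⟩
    cases t with
    | nil => simp at hy; simp [hy, List.getLast]
    | cons b t' =>
      rw [List.getLast_cons (by simp)]
      rcases List.mem_cons.mp hy with rfl | hyt
      · exact le_trans (ha b (by simp)) (ih (by simp) ht b (by simp))
      · exact ih (by simp) ht y hyt

-- A's final step (append out, sort, take last) computes the max of the collected run lengths
lemma hw1_sorted_last (l : List Int) (out : Int) :
    (PySem.List.pyGet? (PySem.List.sorted (l ++ [out]) id false) (-1)).getD 0 = l.foldl max out := by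
  have hperm : (PySem.List.sorted (l ++ [out]) id false).Perm (l ++ [out]) :=
    PySem.List.sorted_perm _ _ _
  have hne : PySem.List.sorted (l ++ [out]) id false ≠ [] := by
    intro h
    have := hperm.length_eq
    simp [h] at this
  rw [PySem.List.pyGet?_neg_one, List.getLast?_eq_some_getLast hne]
  simp only [Option.getD_some]
  have hpair : (PySem.List.sorted (l ++ [out]) id false).Pairwise (· ≤ ·) := by
    have := PySem.List.sorted_pairwise (l ++ [out]) (id : Int → Int)
    simpa using this
  have hG := List.getLast_mem hne
  have hmax := PySem.List.le_foldl_max l out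
  apply le_antisymm
  · -- getLast ∈ l ++ [out], every such element ≤ foldl max
    have : (PySem.List.sorted (l ++ [out]) id false).getLast hne ∈ l ++ [out] :=
      hperm.mem_iff.mp hG
    rcases List.mem_append.mp this with hl | hr
    · exact hmax.2 _ hl
    · simp at hr; rw [hr]; exact hmax.1
  · -- foldl max ∈ sorted list, hence ≤ its last
    have hmem : l.foldl max out ∈ l ++ [out] := by
      rcases PySem.List.foldl_max_mem l out with h | h
      · rw [h]; simp
      · exact List.mem_append.mpr (Or.inl h)
    exact hw1_le_getLast_of_pairwise _ hne hpair _ (hperm.mem_iff.mpr hmem)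

lemma hw1_stepB_best (b c : Int) : (if c > b then c else b) = max b c := by
  split_ifs <;> omega

-- joint loop invariant: B's running best from a matched state equals the max of A's
-- collected run lengths plus its current run
lemma hw1_loop : ∀ (l : List Int) (lst : List Int) (a out : Int),
    (l.foldl hw1_stepB (lst.foldl max out, out, some a)).1
      = (l.foldl hw1_stepA (lst, a, out)).1.foldl max (l.foldl hw1_stepA (lst, a, out)).2.2 := by
  intro l
  induction l with
  | nil => intro lst a out; rfl
  | cons x t ih =>
    intro lst a out
    by_cases hx : x = a
    · subst hx
      have hA : hw1_stepA (lst, x, out) x = (lst, x, out + 1) := by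
        simp [hw1_stepA]
      have hB : hw1_stepB (lst.foldl max out, out, some x) x
          = (lst.foldl max (out + 1), out + 1, some x) := by
        have hm : max (lst.foldl max out) (out + 1) = lst.foldl max (out + 1) := by
          rw [← hw1_foldl_max_max]
          congr 1
          omega
        simp [hw1_stepB]
        rw [← hm]
        split_ifs <;> omega
      simp only [List.foldl_cons, hA, hB]
      exact ih lst x (out + 1)
    · have hA : hw1_stepA (lst, a, out) x = (lst ++ [out], x, 1) := by
        simp [hw1_stepA, hx]
      have hB : hw1_stepB (lst.foldl max out, out, some a) x
          = ((lst ++ [out]).foldl max 1, 1, some x) := by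
        have hm : max (lst.foldl max out) 1 = (lst ++ [out]).foldl max 1 := by
          rw [List.foldl_append]
          simp only [List.foldl_cons, List.foldl_nil]
          rw [← hw1_foldl_max_max, ← hw1_foldl_max_max, max_comm out 1]
        have hne : ¬ (some a = some x) := by
          simpa using fun h => hx h.symm
        simp [hw1_stepB, hw1_stepB_best, hne, hm]
      simp only [List.foldl_cons, hA, hB]
      exact ih (lst ++ [out]) x 1

-- ===== VERDICT (by name: the statement is the Claim_ definition above) =====
theorem homework_1_spec : Claim_equal_homework_1 := by
  intro nums _ hpre
  unfold Spec_homework_1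
  cases nums with
  | nil => exact absurd rfl hpre
  | cons x t =>
    unfold homework_1 homework_1_alt
    simp only [PySem.List.pyGet?_zero_cons, Option.getD_some, List.foldl_cons]
    have hA0 : hw1_stepA ([], x, 0) x = ([], x, 1) := by
      simp [hw1_stepA]
    have hB0 : hw1_stepB (0, 0, none) x = (1, 1, some x) := by
      simp [hw1_stepB]
    rw [hA0, hB0, hw1_sorted_last]
    have := hw1_loop t [] x 1
    simpa using this.symm
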